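-- pv_equiv track=rewrite | github.com/gbeard2/cryptanalysis | utils.py | removeUnsupportedChars
-- ===== SOURCE A (Python) =====
-- aToI = {'A': 0, 'B': 1, 'C': 2, 'D': 3, 'E': 4, 'F': 5, 'G': 6, 'H': 7, 'I': 8, 'J': 9, 'K': 10, 'L': 11, 'M': 12,
--         'N': 13, 'O': 14, 'P': 15, 'Q': 16, 'R': 17, 'S': 18, 'T': 19, 'U': 20, 'V': 21, 'W': 22, 'X': 23, 'Y': 24,
--         'Z': 25}
--
-- def removeUnsupportedChars(text):
--     positions = []
--     unsupportedChars = []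
--     for pos, char in enumerate(text):
--         if char not in aToI:
--             positions.append(pos)
--             unsupportedChars.append(char)
--
--     if positions:
--         rawText = text[:positions[0]]
--         for i in range(0, len(positions) - 1):
--             rawText += text[positions[i] + 1:positions[i + 1]]
--         rawText += text[positions[-1] + 1:]
--     else:
--         rawText = text
--
--     return positions, unsupportedChars, rawText
-- ===== SOURCE B (Python) =====
-- aToI = {'A': 0, 'B': 1, 'C': 2, 'D': 3, 'E': 4, 'F': 5, 'G': 6, 'H': 7, 'I': 8, 'J': 9, 'K': 10, 'L': 11, 'M': 12,
--         'N': 13, 'O': 14, 'P': 15, 'Q': 16, 'R': 17, 'S': 18, 'T': 19, 'U': 20, 'V': 21, 'W': 22, 'X': 23, 'Y': 24,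
--         'Z': 25}
--
-- def removeUnsupportedChars(text):
--     # One classifying scan: dispatch each char to 'kept' or to (positions, unsupportedChars);
--     # no slice reconstruction pass.
--     positions = []
--     unsupportedChars = []
--     kept = []
--     for pos, char in enumerate(text):
--         if char in aToI:
--             kept.append(char)
--         else:
--             positions.append(pos)
--             unsupportedChars.append(char)
--     return positions, unsupportedChars, ''.join(kept)
-- ===== Notes on version B (the rewrite author's own statement) =====
-- stated objective: simpler
-- what changed: B classifies each character in a single scan (dispatching it to 'kept' or to positions/unsupportedChars) and joins the kept characters once, replacing A's second pass that reconstructs rawText by concatenating slices between the recorded positions.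
import Mathlib
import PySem

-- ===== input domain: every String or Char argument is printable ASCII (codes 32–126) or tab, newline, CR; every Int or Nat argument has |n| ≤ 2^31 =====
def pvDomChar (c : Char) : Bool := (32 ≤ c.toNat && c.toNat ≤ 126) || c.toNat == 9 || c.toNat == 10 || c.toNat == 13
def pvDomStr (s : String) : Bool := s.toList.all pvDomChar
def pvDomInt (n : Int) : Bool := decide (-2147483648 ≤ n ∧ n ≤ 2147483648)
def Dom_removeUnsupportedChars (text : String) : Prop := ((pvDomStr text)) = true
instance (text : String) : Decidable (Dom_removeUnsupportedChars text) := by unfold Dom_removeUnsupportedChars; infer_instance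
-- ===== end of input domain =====

-- B replaces A's second pass (stitching slices of the text between the recorded positions) by a
-- single classifying scan that dispatches each character to the kept text or to
-- positions/unsupportedChars; objective: simpler.

-- the module constant aToI (shared context of both Pythons)
def pvAToI : PySem.Dict String Int := PySem.Dict.ofList
  [("A",0),("B",1),("C",2),("D",3),("E",4),("F",5),("G",6),("H",7),("I",8),("J",9),("K",10),("L",11),
   ("M",12),("N",13),("O",14),("P",15),("Q",16),("R",17),("S",18),("T",19),("U",20),("V",21),("W",22),
   ("X",23),("Y",24),("Z",25)]

-- 'char in aToI' (a character of the text, looked up as a 1-char string)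
def pvMem (c : Char) : Bool := PySem.Dict.contains pvAToI (String.ofList [c])

-- ===== PORT A =====
def removeUnsupportedChars (text : String) : List Int × List String × String :=
  let cs := text.toList
  let acc := (PySem.List.enumerate cs 0).foldl
    (fun (a : List Int × List String) pc =>
      if pvMem pc.2 = false then (a.1 ++ [pc.1], a.2 ++ [String.ofList [pc.2]]) else a)
    ([], [])
  let positions := acc.1
  if positions ≠ [] then
    let raw0 := PySem.List.slice cs none (some (PySem.List.pyGetD positions 0 0))
    let mid := (PySem.List.pyRange 0 ((positions.length : Int) - 1) 1).foldl
      (fun r i => r ++ PySem.List.slice cs (some (PySem.List.pyGetD positions i 0 + 1))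
                        (some (PySem.List.pyGetD positions (i + 1) 0))) raw0
    let raw := mid ++ PySem.List.slice cs (some (PySem.List.pyGetD positions (-1) 0 + 1)) none
    (positions, acc.2, String.ofList raw)
  else (positions, acc.2, text)

-- ===== PORT B =====
def removeUnsupportedChars_alt (text : String) : List Int × List String × String :=
  let r := (PySem.List.enumerate text.toList 0).foldl
    (fun (a : List Int × List String × List Char) pc =>
      if pvMem pc.2 then (a.1, a.2.1, a.2.2 ++ [pc.2])
      else (a.1 ++ [pc.1], a.2.1 ++ [String.ofList [pc.2]], a.2.2))
    ([], [], [])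
  (r.1, r.2.1, String.ofList r.2.2)

-- ===== PRECONDITION & SPEC =====
def Spec_removeUnsupportedChars (text : String) (out : List Int × List String × String) : Prop := out = removeUnsupportedChars_alt text
instance (text : String) (out : List Int × List String × String) : Decidable (Spec_removeUnsupportedChars text out) := by unfold Spec_removeUnsupportedChars; infer_instance

-- ===== CLAIM (what is proved, stated in full; the proofs are below) =====
def Claim_equal_removeUnsupportedChars : Prop := ∀ (text : String), Dom_removeUnsupportedChars text → Spec_removeUnsupportedChars text (removeUnsupportedChars text)

-- ===== LEMMAS AND PROOFS =====

-- indices (0-based) of the unsupported characters of a list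
def unsupIdx : List Char → List Nat
  | [] => []
  | x :: xs => if pvMem x then (unsupIdx xs).map (· + 1) else 0 :: (unsupIdx xs).map (· + 1)

-- A's slice reconstruction, written structurally over the position list
def stitchRest (cs : List Char) : Nat → List Nat → List Char
  | p, [] => cs.drop (p + 1)
  | p, q :: qs => (cs.drop (p + 1)).take (q - (p + 1)) ++ stitchRest cs q qs

def stitch (cs : List Char) : List Nat → List Char
  | [] => cs
  | p :: ps => cs.take p ++ stitchRest cs p ps

theorem foldB_eq (cs : List Char) : ∀ (s : Int) (P : List Int) (U : List String) (K : List Char),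
    (PySem.List.enumerate cs s).foldl
      (fun (a : List Int × List String × List Char) pc =>
        if pvMem pc.2 then (a.1, a.2.1, a.2.2 ++ [pc.2])
        else (a.1 ++ [pc.1], a.2.1 ++ [String.ofList [pc.2]], a.2.2)) (P, U, K)
    = (P ++ (unsupIdx cs).map (fun n : Nat => s + (n : Int)),
       U ++ (cs.filter (fun c => !pvMem c)).map (fun c => String.ofList [c]),
       K ++ cs.filter pvMem) := by
  induction cs with
  | nil => intro s P U K; simp [PySem.List.enumerate_nil, unsupIdx]
  | cons x xs ih =>
      intro s P U K
      rw [PySem.List.enumerate_cons]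
      by_cases hx : pvMem x
      · simp only [List.foldl_cons, hx, if_true, ih (s + 1)]
        simp only [unsupIdx, hx, if_true, List.filter_cons, Bool.not_true]
        simp [List.append_assoc]
        intro a _
        ring
      · simp only [List.foldl_cons, hx, Bool.false_eq_true, if_false, ih (s + 1)]
        simp only [unsupIdx, hx, Bool.false_eq_true, if_false, List.filter_cons, Bool.not_false,
          List.map_cons]
        simp [List.append_assoc]
        intro a _
        ring

theorem foldA_eq (cs : List Char) : ∀ (s : Int) (P : List Int) (U : List String),
    (PySem.List.enumerate cs s).foldl
      (fun (a : List Int × List String) pc =>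
        if pvMem pc.2 = false then (a.1 ++ [pc.1], a.2 ++ [String.ofList [pc.2]]) else a) (P, U)
    = (P ++ (unsupIdx cs).map (fun n : Nat => s + (n : Int)),
       U ++ (cs.filter (fun c => !pvMem c)).map (fun c => String.ofList [c])) := by
  induction cs with
  | nil => intro s P U; simp [PySem.List.enumerate_nil, unsupIdx]
  | cons x xs ih =>
      intro s P U
      rw [PySem.List.enumerate_cons]
      by_cases hx : pvMem x
      · simp only [List.foldl_cons, hx, Bool.true_eq_false, if_false, ih (s + 1)]
        simp only [unsupIdx, hx, if_true, List.filter_cons, Bool.not_true]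
        simp
        intro a _
        ring
      · simp only [List.foldl_cons, hx]
        simp only [Bool.not_eq_true] at hx
        simp only [if_true, ih (s + 1)]
        simp only [unsupIdx, hx, Bool.false_eq_true, if_false, List.filter_cons, Bool.not_false]
        simp [List.append_assoc]
        intro a _
        ring

theorem stitchRest_shift (x : Char) (cs : List Char) :
    ∀ (ps : List Nat) (p : Nat), stitchRest (x :: cs) (p + 1) (ps.map (· + 1)) = stitchRest cs p ps := by
  intro ps
  induction ps with
  | nil => intro p; simp [stitchRest]
  | cons q qs ih =>
      intro p
      simp only [List.map_cons, stitchRest, List.drop_succ_cons, ih q]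
      congr 2
      omega

theorem stitch_shift (x : Char) (cs : List Char) (ps : List Nat) :
    stitch (x :: cs) (ps.map (· + 1)) = x :: stitch cs ps := by
  cases ps with
  | nil => simp [stitch]
  | cons p ps => simp [stitch, List.take_succ_cons, stitchRest_shift]

theorem stitch_cons0 (x : Char) (cs : List Char) (ps : List Nat) :
    stitch (x :: cs) (0 :: ps.map (· + 1)) = stitch cs ps := by
  cases ps with
  | nil => simp [stitch, stitchRest]
  | cons q qs => simp [stitch, stitchRest, stitchRest_shift]

theorem stitch_unsupIdx (cs : List Char) : stitch cs (unsupIdx cs) = cs.filter pvMem := by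
  induction cs with
  | nil => simp [stitch, unsupIdx]
  | cons x xs ih =>
      by_cases h : pvMem x
      · simp [unsupIdx, h, stitch_shift, ih]
      · simp [unsupIdx, h, stitch_cons0, ih]

theorem filter_of_unsupIdx_nil (cs : List Char) (h : unsupIdx cs = []) : cs.filter pvMem = cs := by
  induction cs with
  | nil => rfl
  | cons x xs ih =>
      by_cases hx : pvMem x
      · simp only [unsupIdx, hx, if_true, List.map_eq_nil_iff] at h
        simp [hx, ih h]
      · simp [unsupIdx, hx] at h

theorem loopShift (cs : List Char) (pos' : List Int) (x : Int) (n : Nat) (r : List Char) :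
    (PySem.List.pyRange 1 ((n : Int) + 1) 1).foldl
      (fun r i => r ++ PySem.List.slice cs (some (PySem.List.pyGetD (x :: pos') i 0 + 1))
                        (some (PySem.List.pyGetD (x :: pos') (i + 1) 0))) r
    = (PySem.List.pyRange 0 (n : Int) 1).foldl
      (fun r i => r ++ PySem.List.slice cs (some (PySem.List.pyGetD pos' i 0 + 1))
                        (some (PySem.List.pyGetD pos' (i + 1) 0))) r := by
  rw [PySem.List.pyRange_one 1 ((n : Int) + 1), PySem.List.pyRange_one 0 (n : Int)]
  have h1 : (((n : Int) + 1) - 1).toNat = n := by omega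
  have h2 : ((n : Int) - 0).toNat = n := by omega
  rw [h1, h2, List.foldl_map, List.foldl_map]
  have hf : (fun (r : List Char) (k : Nat) => r ++ PySem.List.slice cs
        (some (PySem.List.pyGetD (x :: pos') ((1 : Int) + (k : Int)) 0 + 1))
        (some (PySem.List.pyGetD (x :: pos') ((1 : Int) + (k : Int) + 1) 0)))
      = (fun (r : List Char) (k : Nat) => r ++ PySem.List.slice cs
        (some (PySem.List.pyGetD pos' ((0 : Int) + (k : Int)) 0 + 1))
        (some (PySem.List.pyGetD pos' ((0 : Int) + (k : Int) + 1) 0))) := by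
    funext r k
    have g1 : PySem.List.pyGetD (x :: pos') ((1 : Int) + (k : Int)) 0 = pos'.getD k 0 := by
      have e : (1 : Int) + (k : Int) = ((k + 1 : Nat) : Int) := by push_cast; ring
      rw [e, PySem.List.pyGetD_natCast, List.getD_cons_succ]
    have g2 : PySem.List.pyGetD (x :: pos') ((1 : Int) + (k : Int) + 1) 0 = pos'.getD (k + 1) 0 := by
      have e : (1 : Int) + (k : Int) + 1 = ((k + 2 : Nat) : Int) := by push_cast; ring
      rw [e, PySem.List.pyGetD_natCast]
      show List.getD (x :: pos') (k + 1 + 1) 0 = _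
      rw [List.getD_cons_succ]
    have g3 : PySem.List.pyGetD pos' ((0 : Int) + (k : Int)) 0 = pos'.getD k 0 := by
      have e : (0 : Int) + (k : Int) = ((k : Nat) : Int) := by omega
      rw [e, PySem.List.pyGetD_natCast]
    have g4 : PySem.List.pyGetD pos' ((0 : Int) + (k : Int) + 1) 0 = pos'.getD (k + 1) 0 := by
      have e : (0 : Int) + (k : Int) + 1 = ((k + 1 : Nat) : Int) := by push_cast; ring
      rw [e, PySem.List.pyGetD_natCast]
    rw [g2, g1, g4, g3]
  rw [hf]

theorem pyGetD_neg_one_map_cast : ∀ (qs : List Nat) (q : Nat),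
    PySem.List.pyGetD ((q :: qs).map (fun n : Nat => (n : Int))) (-1) 0 = ((qs.getLastD q : Nat) : Int) := by
  intro qs
  induction qs with
  | nil =>
      intro q
      have h : ((q : Nat) :: ([] : List Nat)).map (fun n : Nat => (n : Int)) = [] ++ [(q : Int)] := by simp
      rw [h, PySem.List.pyGetD_neg_one_append_singleton]
      rfl
  | cons q' rest ih =>
      intro q
      have hstep : PySem.List.pyGetD ((q :: q' :: rest).map (fun n : Nat => (n : Int))) (-1) 0
          = PySem.List.pyGetD ((q' :: rest).map (fun n : Nat => (n : Int))) (-1) 0 := by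
        rw [PySem.List.pyGetD_neg_one _ 0 (by simp), PySem.List.pyGetD_neg_one _ 0 (by simp)]
        simp only [List.map_cons]
        rw [List.getLast_cons]
      rw [hstep, ih q', List.getLastD_cons]

theorem midfin (cs : List Char) : ∀ (qs : List Nat) (q : Nat) (r : List Char),
    (PySem.List.pyRange 0 ((((q :: qs).map (fun n : Nat => (n : Int))).length : Int) - 1) 1).foldl
      (fun r i => r ++ PySem.List.slice cs
          (some (PySem.List.pyGetD ((q :: qs).map (fun n : Nat => (n : Int))) i 0 + 1))
          (some (PySem.List.pyGetD ((q :: qs).map (fun n : Nat => (n : Int))) (i + 1) 0))) r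
      ++ cs.drop (qs.getLastD q + 1)
    = r ++ stitchRest cs q qs := by
  intro qs
  induction qs with
  | nil =>
      intro q r
      simp [PySem.List.pyRange_one_eq_nil, stitchRest]
  | cons q' rest ih =>
      intro q r
      have hb : ((((q :: q' :: rest).map (fun n : Nat => (n : Int))).length : Int) - 1)
          = ((rest.length : Int) + 1) := by
        simp only [List.length_map, List.length_cons]
        push_cast
        ring
      rw [hb, PySem.List.pyRange_one_cons (by positivity)]
      simp only [List.foldl_cons, zero_add]
      have hg0 : PySem.List.pyGetD ((q :: q' :: rest).map (fun n : Nat => (n : Int))) 0 0 = (q : Int) := by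
        simp only [List.map_cons]
        rw [PySem.List.pyGetD_zero_cons]
      have hg1 : PySem.List.pyGetD ((q :: q' :: rest).map (fun n : Nat => (n : Int))) (1 : Int) 0 = (q' : Int) := by
        have e : ((1 : Nat) : Int) = (1 : Int) := rfl
        rw [← e, PySem.List.pyGetD_natCast]
        simp
      rw [hg0, hg1]
      have hsl : PySem.List.slice cs (some ((q : Int) + 1)) (some (q' : Int))
          = (cs.drop (q + 1)).take (q' - (q + 1)) := by
        have e : ((q : Int) + 1) = ((q + 1 : Nat) : Int) := by push_cast; ring
        rw [e, PySem.List.slice_natCast]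
      rw [hsl]
      have hshift := loopShift cs ((q' :: rest).map (fun n : Nat => (n : Int))) (q : Int)
        rest.length (r ++ (cs.drop (q + 1)).take (q' - (q + 1)))
      simp only [List.map_cons] at hshift ⊢
      rw [hshift]
      have ihv := ih q' (r ++ (cs.drop (q + 1)).take (q' - (q + 1)))
      have hb2 : ((((q' :: rest).map (fun n : Nat => (n : Int))).length : Int) - 1)
          = (rest.length : Int) := by
        simp only [List.length_map, List.length_cons]
        push_cast
        ring
      rw [hb2, List.map_cons] at ihv
      simp only [List.getLastD_cons] at ihv ⊢
      rw [ihv, stitchRest, List.append_assoc]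

-- ===== VERDICT (by name: the statement is the Claim_ definition above) =====
theorem removeUnsupportedChars_spec : Claim_equal_removeUnsupportedChars := by
  intro text _
  unfold Spec_removeUnsupportedChars
  unfold removeUnsupportedChars removeUnsupportedChars_alt
  simp only [foldA_eq text.toList 0 [] [], foldB_eq text.toList 0 [] [] [], List.nil_append]
  have hz : ((unsupIdx text.toList).map (fun n : Nat => (0 : Int) + (n : Int)))
      = (unsupIdx text.toList).map (fun n : Nat => (n : Int)) := by
    refine List.map_congr_left ?_
    intro a _
    ring
  rw [hz]
  cases hu : unsupIdx text.toList with
  | nil =>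
      simp only [List.map_nil, ne_eq, not_true_eq_false, if_false]
      have h3 : String.ofList (text.toList.filter pvMem) = text := by
        rw [filter_of_unsupIdx_nil _ hu]
        simp
      rw [h3]
  | cons q qs =>
      simp only [List.map_cons, ne_eq, reduceCtorEq, not_false_eq_true, if_true]
      have hraw0 : PySem.List.slice text.toList none
          (some (PySem.List.pyGetD ((q : Int) :: qs.map (fun n : Nat => (n : Int))) 0 0))
          = text.toList.take q := by
        rw [PySem.List.pyGetD_zero_cons, PySem.List.slice_to_natCast]
      have hlast := pyGetD_neg_one_map_cast qs q
      rw [List.map_cons] at hlast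
      have hfin : PySem.List.slice text.toList
          (some (PySem.List.pyGetD ((q : Int) :: qs.map (fun n : Nat => (n : Int))) (-1) 0 + 1)) none
          = text.toList.drop (qs.getLastD q + 1) := by
        rw [hlast]
        have e : ((qs.getLastD q : Nat) : Int) + 1 = ((qs.getLastD q + 1 : Nat) : Int) := by push_cast; ring
        rw [e, PySem.List.slice_from_natCast]
      have hmf := midfin text.toList qs q (text.toList.take q)
      rw [List.map_cons] at hmf
      have hlen : (((((q : Int) :: qs.map (fun n : Nat => (n : Int))).length : Nat)) : Int)
          = (((q :: qs).map (fun n : Nat => (n : Int))).length : Int) := by simp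
      rw [hraw0, hfin]
      have hstitch : text.toList.take q ++ stitchRest text.toList q qs
          = text.toList.filter pvMem := by
        have h1 : text.toList.take q ++ stitchRest text.toList q qs = stitch text.toList (q :: qs) := rfl
        rw [h1, ← hu, stitch_unsupIdx]
      rw [show ((q : Int) :: qs.map (fun n : Nat => (n : Int))) = (q :: qs).map (fun n : Nat => (n : Int)) by simp] at *
      rw [hmf, hstitch]
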